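-- pv_equiv track=rewrite | github.com/fandrei/GitTabSpaceConverter | TabSpaceConverter.py | ReplaceBeginning
-- ===== SOURCE A (Python) =====
-- def ReplaceBeginning(text, match, newVal):
--     res = ""
--     i = 0
--
--     while i < len(text):
--         if Contains(text, match, i):
--             res += newVal
--             i += len(match)
--         else:
--             res += text[i:]
--             break
--
--     return res
--
-- def Contains(text, match, pos):
--     i = pos
--     while True:
--         if i - pos >= len(match):
--             return True
--         if i >= len(text):
--             break
--         if text[i] != match[i - pos]:
--             return False
--         i += 1
--
--     return False
-- ===== SOURCE B (Python) =====
-- def ReplaceBeginning(text, match, newVal):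
--     if not match:
--         return text
--     m = len(match)
--     j = 0
--     while j < len(text) and text[j] == match[j % m]:
--         j += 1
--     count = j // m
--     return newVal * count + text[count * m:]
-- ===== Notes on version B (the rewrite author's own statement) =====
-- stated objective: simpler
-- what changed: Replaces A's repeated Contains prefix-checks and incremental accumulation with a single char-level scan against the periodic extension of match (index j % len(match)), deriving the repetition count by integer division and building the result in one expression.
import Mathlib
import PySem

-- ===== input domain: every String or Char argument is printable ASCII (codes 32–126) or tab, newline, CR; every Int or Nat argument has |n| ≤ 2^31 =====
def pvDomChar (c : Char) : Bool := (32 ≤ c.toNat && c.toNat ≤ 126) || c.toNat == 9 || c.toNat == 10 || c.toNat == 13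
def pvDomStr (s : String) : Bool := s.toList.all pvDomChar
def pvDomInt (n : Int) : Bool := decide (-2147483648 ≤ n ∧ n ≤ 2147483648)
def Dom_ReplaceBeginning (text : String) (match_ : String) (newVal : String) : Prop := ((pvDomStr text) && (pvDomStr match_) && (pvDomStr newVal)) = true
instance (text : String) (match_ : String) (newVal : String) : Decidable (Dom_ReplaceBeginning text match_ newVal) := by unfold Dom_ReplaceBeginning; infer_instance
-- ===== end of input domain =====

-- B scans the text once against the periodic extension of match (char j vs match[j % m])
-- and derives the repetition count by integer division, instead of A's repeated
-- Contains prefix-checks with incremental accumulation; equal return values on Pre_.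

-- ===== PORT A =====
-- Contains(text, match, pos): walks text from pos against match char by char; here the
-- suffix text.drop pos and the remaining match are walked together (same comparisons,
-- same branch order: match exhausted → true, text exhausted → false, mismatch → false).
def pyContains : List Char → List Char → Bool
  | _, [] => true
  | [], _ :: _ => false
  | t :: ts, m :: ms => if t ≠ m then false else pyContains ts ms

-- A's while loop over index i accumulating res; A diverges when match_ = [] and the
-- text is nonempty, so the loop carries fuel (text.length + 1 suffices elsewhere).
def loopA (fuel : Nat) (text match_ newVal res : List Char) (i : Nat) : List Char :=
  match fuel with
  | 0 => res
  | fuel + 1 =>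
    if i < text.length then
      if pyContains (text.drop i) match_ then
        loopA fuel text match_ newVal (res ++ newVal) (i + match_.length)
      else
        res ++ text.drop i
    else res

def ReplaceBeginning (text : String) (match_ : String) (newVal : String) : String :=
  String.ofList (loopA (text.toList.length + 1) text.toList match_.toList newVal.toList [] 0)

-- ===== PORT B =====
-- Source B's while loop: advance j while text[j] equals match[j % len(match)].
def scanB (text match_ : List Char) (j : Nat) : Nat :=
  if h : j < text.length ∧ text[j]? = match_[j % match_.length]? then
    scanB text match_ (j + 1)
  else j
termination_by text.length - j
decreasing_by obtain ⟨h1, -⟩ := h; omega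

def ReplaceBeginning_alt (text : String) (match_ : String) (newVal : String) : String :=
  if match_.toList = [] then text
  else
    let m := match_.toList.length
    let j := scanB text.toList match_.toList 0
    let count := j / m
    String.ofList ((List.replicate count newVal.toList).flatten ++ text.toList.drop (count * m))

-- ===== PRECONDITION & SPEC =====
-- Pre_ excludes only the inputs where A never returns: with match_ = "" and text ≠ ""
-- A's loop adds newVal forever (i += 0), an infinite loop in Python.
def Pre_ReplaceBeginning (text : String) (match_ : String) (newVal : String) : Prop :=
  text = "" ∨ match_ ≠ ""
instance (text : String) (match_ : String) (newVal : String) : Decidable (Pre_ReplaceBeginning text match_ newVal) := by unfold Pre_ReplaceBeginning; infer_instance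

def pvWitness_ReplaceBeginning : String × String × String := ("    x y", "  ", "\t")

def Spec_ReplaceBeginning (text : String) (match_ : String) (newVal : String) (out : String) : Prop := out = ReplaceBeginning_alt text match_ newVal
instance (text : String) (match_ : String) (newVal : String) (out : String) : Decidable (Spec_ReplaceBeginning text match_ newVal out) := by unfold Spec_ReplaceBeginning; infer_instance

-- ===== CLAIM (what is proved, stated in full; the proofs are below) =====
def Claim_equal_ReplaceBeginning : Prop := ∀ (text : String) (match_ : String) (newVal : String), Dom_ReplaceBeginning text match_ newVal → Pre_ReplaceBeginning text match_ newVal → Spec_ReplaceBeginning text match_ newVal (ReplaceBeginning text match_ newVal)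

-- ===== LEMMAS AND PROOFS =====

-- Contains is a pointwise prefix check.
lemma pyContains_iff (t m : List Char) :
    pyContains t m = true ↔ (m.length ≤ t.length ∧ ∀ d < m.length, t[d]? = m[d]?) := by
  induction m generalizing t with
  | nil => simp [pyContains]
  | cons c ms ih =>
    cases t with
    | nil => simp [pyContains]
    | cons a ts =>
      by_cases hac : a = c
      · subst hac
        have hred : pyContains (a :: ts) (a :: ms) = pyContains ts ms := by
          simp [pyContains]
        rw [hred, ih]
        constructor
        · rintro ⟨h1, h2⟩
          refine ⟨by simpa using h1, ?_⟩
          intro d hd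
          cases d with
          | zero => simp
          | succ d => simpa using h2 d (by simpa using hd)
        · rintro ⟨h1, h2⟩
          refine ⟨by simpa using h1, ?_⟩
          intro d hd
          simpa using h2 (d + 1) (by simpa using hd)
      · have hred : pyContains (a :: ts) (c :: ms) = false := by
          simp [pyContains, hac]
        rw [hred]
        constructor
        · intro h; cases h
        · rintro ⟨-, h2⟩
          have := h2 0 (by simp)
          simp at this
          exact absurd this hac

lemma scanB_ge (t m : List Char) (j : Nat) : j ≤ scanB t m j := by
  induction j using scanB.induct t m with
  | case1 j h ih => rw [scanB, dif_pos h]; omega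
  | case2 j h => rw [scanB, dif_neg h]

lemma scanB_le_len (t m : List Char) (j : Nat) (hj : j ≤ t.length) :
    scanB t m j ≤ t.length := by
  induction j using scanB.induct t m with
  | case1 j h ih => rw [scanB, dif_pos h]; exact ih (by omega)
  | case2 j h => rw [scanB, dif_neg h]; exact hj

lemma scanB_mid (t m : List Char) (j : Nat) :
    ∀ k, j ≤ k → k < scanB t m j → k < t.length ∧ t[k]? = m[k % m.length]? := by
  induction j using scanB.induct t m with
  | case1 j h ih =>
    intro k hjk hk
    rcases Nat.eq_or_lt_of_le hjk with heq | hlt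
    · subst heq; exact h
    · rw [scanB, dif_pos h] at hk
      exact ih k hlt hk
  | case2 j h =>
    intro k hjk hk
    rw [scanB, dif_neg h] at hk
    omega

lemma scanB_stop (t m : List Char) (j : Nat) :
    ¬(scanB t m j < t.length ∧ t[scanB t m j]? = m[scanB t m j % m.length]?) := by
  induction j using scanB.induct t m with
  | case1 j h ih => rw [scanB, dif_pos h]; exact ih
  | case2 j h => rw [scanB, dif_neg h]; exact h

-- The main bridge: A's loop from a block-aligned position i equals B's count-and-drop form.
lemma loopA_eq_scan (fuel : Nat) : ∀ (t m nv res : List Char) (i : Nat), m ≠ [] →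
    m.length ∣ i → i ≤ scanB t m 0 → t.length - i < fuel →
    loopA fuel t m nv res i =
      res ++ (List.replicate (scanB t m 0 / m.length - i / m.length) nv).flatten
          ++ t.drop (scanB t m 0 / m.length * m.length) := by
  induction fuel with
  | zero => intro _ _ _ _ _ _ _ _ h; omega
  | succ fuel ih =>
    intro t m nv res i hm hdvd hiJ hfuel
    have hml : 0 < m.length := List.length_pos_iff.mpr hm
    have hidm : i / m.length * m.length = i := Nat.div_mul_cancel hdvd
    have hJlen : scanB t m 0 ≤ t.length := scanB_le_len t m 0 (by omega)
    have hmid : ∀ k, k < scanB t m 0 → k < t.length ∧ t[k]? = m[k % m.length]? :=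
      fun k hk => scanB_mid t m 0 k (Nat.zero_le _) hk
    have hstop := scanB_stop t m 0
    have hmod : ∀ d, d < m.length → (i + d) % m.length = d := by
      intro d hd
      conv_lhs => rw [← hidm]
      rw [Nat.mul_comm, Nat.mul_add_mod, Nat.mod_eq_of_lt hd]
    by_cases hi : i < t.length
    · by_cases hc : pyContains (t.drop i) m = true
      · -- block matches: every position i..i+m.length-1 is below scanB t m 0
        obtain ⟨hlen, hpt⟩ := (pyContains_iff _ _).mp hc
        rw [List.length_drop] at hlen
        have hpt' : ∀ d < m.length, t[i + d]? = m[d]? := by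
          intro d hd
          have := hpt d hd
          rwa [List.getElem?_drop] at this
        have hstep : i + m.length ≤ scanB t m 0 := by
          by_contra hnot
          have hgej := scanB_ge t m 0
          have hJi : scanB t m 0 - i < m.length := by omega
          apply hstop
          have hJi2 : scanB t m 0 = i + (scanB t m 0 - i) := by omega
          refine ⟨by omega, ?_⟩
          rw [hJi2, hmod _ hJi]
          exact hpt' _ hJi
        have hdvd' : m.length ∣ (i + m.length) := Nat.dvd_add hdvd dvd_rfl
        have hrec := ih t m nv (res ++ nv) (i + m.length) hm hdvd' (by omega) (by omega)
        have hdivsucc : (i + m.length) / m.length = i / m.length + 1 :=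
          Nat.add_div_right _ hml
        have hle : i / m.length + 1 ≤ scanB t m 0 / m.length := by
          have := Nat.div_le_div_right (c := m.length) hstep
          rwa [hdivsucc] at this
        have hcount : scanB t m 0 / m.length - i / m.length
            = (scanB t m 0 / m.length - (i + m.length) / m.length) + 1 := by
          rw [hdivsucc]; omega
        simp only [loopA, hi, if_true, hc, hrec, hcount, List.replicate_succ,
          List.flatten_cons, List.append_assoc]
      · -- block fails: scanB t m 0 lies inside this block, count stops here
        have hJlt : scanB t m 0 < i + m.length := by
          by_contra hnot
          apply hc
          rw [pyContains_iff]
          constructor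
          · rw [List.length_drop]; omega
          · intro d hd
            rw [List.getElem?_drop]
            have := hmid (i + d) (by omega)
            rw [this.2, hmod _ hd]
        have hdiv : scanB t m 0 / m.length = i / m.length := by
          refine Nat.div_eq_of_lt_le (by rw [hidm]; omega) ?_
          rw [Nat.succ_mul, hidm]; omega
        have hdropi : scanB t m 0 / m.length * m.length = i := by rw [hdiv, hidm]
        simp only [loopA, hi, if_true, hc, if_false, Bool.false_eq_true]
        rw [hdropi, hdiv]
        simp
    · -- i ≥ text length: i = scanB t m 0 = t.length, nothing to add
      have hge := scanB_ge t m 0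
      have hiJ2 : i = scanB t m 0 := by omega
      subst hiJ2
      have hnil : t.drop (scanB t m 0 / m.length * m.length) = [] := by
        rw [hidm]
        exact List.drop_eq_nil_of_le (by omega)
      simp [loopA, hi, hnil]

-- ===== VERDICT (by name: the statement is the Claim_ definition above) =====
theorem ReplaceBeginning_spec : Claim_equal_ReplaceBeginning := by
  intro text match_ newVal _ hpre
  unfold Spec_ReplaceBeginning ReplaceBeginning ReplaceBeginning_alt
  by_cases hm : match_.toList = []
  · rcases hpre with hpre | hpre
    · subst hpre
      simp only [if_pos hm]
      rfl
    · exact absurd (String.toList_eq_nil_iff.mp hm) hpre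
  · rw [if_neg hm]
    rw [loopA_eq_scan (text.toList.length + 1) text.toList match_.toList newVal.toList [] 0
      hm (Nat.dvd_zero _) (Nat.zero_le _) (by omega)]
    simp
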